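-- pv_equiv track=rewrite | github.com/matt-gun/ecalendar-ha | ecalendar/backend/app/api/weather.py | _wmo_code
-- ===== SOURCE A (Python) =====
-- def _wmo_code(code: int) -> tuple[str, str]:
--     mapping = {
--         0: ("Clear", "01d"),
--         1: ("Mainly clear", "01d"),
--         2: ("Partly cloudy", "02d"),
--         3: ("Overcast", "04d"),
--         45: ("Foggy", "50d"),
--         48: ("Depositing rime fog", "50d"),
--         51: ("Light drizzle", "09d"),
--         61: ("Slight rain", "10d"),
--         63: ("Moderate rain", "10d"),
--         71: ("Slight snow", "13d"),
--         80: ("Slight rain showers", "09d"),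
--         95: ("Thunderstorm", "11d"),
--     }
--     for k, v in sorted(mapping.items(), reverse=True):
--         if code >= k:
--             return v
--     return ("Unknown", "01d")
-- ===== SOURCE B (Python) =====
-- _THRESHOLDS = [0, 1, 2, 3, 45, 48, 51, 61, 63, 71, 80, 95]
-- _VALUES = [
--     ("Clear", "01d"),
--     ("Mainly clear", "01d"),
--     ("Partly cloudy", "02d"),
--     ("Overcast", "04d"),
--     ("Foggy", "50d"),
--     ("Depositing rime fog", "50d"),
--     ("Light drizzle", "09d"),
--     ("Slight rain", "10d"),
--     ("Moderate rain", "10d"),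
--     ("Slight snow", "13d"),
--     ("Slight rain showers", "09d"),
--     ("Thunderstorm", "11d"),
-- ]
--
--
-- def _bisect_right(a, x):
--     lo, hi = 0, len(a)
--     while lo < hi:
--         mid = (lo + hi) // 2
--         if x < a[mid]:
--             hi = mid
--         else:
--             lo = mid + 1
--     return lo
--
--
-- def _wmo_code(code: int) -> tuple[str, str]:
--     i = _bisect_right(_THRESHOLDS, code)
--     if i == 0:
--         return ("Unknown", "01d")
--     return _VALUES[i - 1]
-- ===== Notes on version B (the rewrite author's own statement) =====
-- stated objective: alternative
-- what changed: Replaced A's descending linear scan of the sorted threshold table with a bisect_right binary search over the ascending thresholds plus a parallel values list.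
import Mathlib
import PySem

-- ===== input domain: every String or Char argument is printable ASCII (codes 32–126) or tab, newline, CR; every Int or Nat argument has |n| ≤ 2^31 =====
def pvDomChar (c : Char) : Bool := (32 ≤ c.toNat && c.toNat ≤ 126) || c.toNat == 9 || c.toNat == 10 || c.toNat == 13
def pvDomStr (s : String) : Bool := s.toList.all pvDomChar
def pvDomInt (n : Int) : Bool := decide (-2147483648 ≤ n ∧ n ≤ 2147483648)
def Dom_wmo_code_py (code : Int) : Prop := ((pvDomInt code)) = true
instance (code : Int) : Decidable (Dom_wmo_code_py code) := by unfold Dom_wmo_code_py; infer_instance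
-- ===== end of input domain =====

-- B replaces A's descending linear scan of the threshold table by a hand-written
-- bisect_right binary search over the ascending thresholds (objective: alternative).

-- ===== PORT A =====
-- A's dict, after sorted(mapping.items(), reverse=True): descending threshold order.
def wmoTableA : List (Int × String × String) :=
  [(95, "Thunderstorm", "11d"), (80, "Slight rain showers", "09d"),
   (71, "Slight snow", "13d"), (63, "Moderate rain", "10d"),
   (61, "Slight rain", "10d"), (51, "Light drizzle", "09d"),
   (48, "Depositing rime fog", "50d"), (45, "Foggy", "50d"),
   (3, "Overcast", "04d"), (2, "Partly cloudy", "02d"),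
   (1, "Mainly clear", "01d"), (0, "Clear", "01d")]

-- the 'for k, v in …: if code >= k: return v' loop
def wmoScanA (code : Int) : List (Int × String × String) → String × String
  | [] => ("Unknown", "01d")
  | (k, v) :: rest => if code ≥ k then v else wmoScanA code rest

def wmo_code_py (code : Int) : String × String := wmoScanA code wmoTableA

-- ===== PORT B =====
def wmoThresholds : List Int := [0, 1, 2, 3, 45, 48, 51, 61, 63, 71, 80, 95]

def wmoValues : List (String × String) :=
  [("Clear", "01d"), ("Mainly clear", "01d"), ("Partly cloudy", "02d"),
   ("Overcast", "04d"), ("Foggy", "50d"), ("Depositing rime fog", "50d"),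
   ("Light drizzle", "09d"), ("Slight rain", "10d"), ("Moderate rain", "10d"),
   ("Slight snow", "13d"), ("Slight rain showers", "09d"), ("Thunderstorm", "11d")]

-- Source B's hand-written while-loop bisect_right, lo/hi as the loop state;
-- fuel bounds the iteration count (hi - lo shrinks every step, so hi - lo fuel suffices)
def wmoBisectRight (a : List Int) (x : Int) : Nat → Nat → Nat → Nat
  | 0, lo, _ => lo
  | fuel + 1, lo, hi =>
    if lo < hi then
      let mid := (lo + hi) / 2
      if x < a.getD mid 0 then wmoBisectRight a x fuel lo mid
      else wmoBisectRight a x fuel (mid + 1) hi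
    else lo

def wmo_code_py_alt (code : Int) : String × String :=
  let i := wmoBisectRight wmoThresholds code wmoThresholds.length 0 wmoThresholds.length
  if i = 0 then ("Unknown", "01d")
  else wmoValues.getD (i - 1) ("", "")

-- ===== PRECONDITION & SPEC =====
def Spec_wmo_code_py (code : Int) (out : String × String) : Prop := out = wmo_code_py_alt code
instance (code : Int) (out : String × String) : Decidable (Spec_wmo_code_py code out) := by unfold Spec_wmo_code_py; infer_instance

-- ===== CLAIM (what is proved, stated in full; the proofs are below) =====
def Claim_equal_wmo_code_py : Prop := ∀ (code : Int), Dom_wmo_code_py code → Spec_wmo_code_py code (wmo_code_py code)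

-- ===== LEMMAS AND PROOFS =====

-- ===== VERDICT (by name: the statement is the Claim_ definition above) =====
theorem wmo_code_py_spec : Claim_equal_wmo_code_py := by
  intro code _
  show wmo_code_py code = wmo_code_py_alt code
  by_cases h0 : code < (0:Int)
  · -- interval (-inf, 0)
    simp [wmo_code_py, wmo_code_py_alt, wmoScanA, wmoTableA, wmoThresholds, wmoValues,
      wmoBisectRight,
      show ¬ ((0:Int) ≤ code) by omega,
      show code < (0:Int) by omega,
      show ¬ ((1:Int) ≤ code) by omega,
      show code < (1:Int) by omega,
      show ¬ ((2:Int) ≤ code) by omega,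
      show code < (2:Int) by omega,
      show ¬ ((3:Int) ≤ code) by omega,
      show code < (3:Int) by omega,
      show ¬ ((45:Int) ≤ code) by omega,
      show code < (45:Int) by omega,
      show ¬ ((48:Int) ≤ code) by omega,
      show code < (48:Int) by omega,
      show ¬ ((51:Int) ≤ code) by omega,
      show code < (51:Int) by omega,
      show ¬ ((61:Int) ≤ code) by omega,
      show code < (61:Int) by omega,
      show ¬ ((63:Int) ≤ code) by omega,
      show code < (63:Int) by omega,
      show ¬ ((71:Int) ≤ code) by omega,
      show code < (71:Int) by omega,
      show ¬ ((80:Int) ≤ code) by omega,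
      show code < (80:Int) by omega,
      show ¬ ((95:Int) ≤ code) by omega,
      show code < (95:Int) by omega]
  by_cases h1 : code < (1:Int)
  · -- interval [0, 1)
    simp [wmo_code_py, wmo_code_py_alt, wmoScanA, wmoTableA, wmoThresholds, wmoValues,
      wmoBisectRight,
      show ((0:Int) ≤ code) by omega,
      show ¬ code < (0:Int) by omega,
      show ¬ ((1:Int) ≤ code) by omega,
      show code < (1:Int) by omega,
      show ¬ ((2:Int) ≤ code) by omega,
      show code < (2:Int) by omega,
      show ¬ ((3:Int) ≤ code) by omega,
      show code < (3:Int) by omega,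
      show ¬ ((45:Int) ≤ code) by omega,
      show code < (45:Int) by omega,
      show ¬ ((48:Int) ≤ code) by omega,
      show code < (48:Int) by omega,
      show ¬ ((51:Int) ≤ code) by omega,
      show code < (51:Int) by omega,
      show ¬ ((61:Int) ≤ code) by omega,
      show code < (61:Int) by omega,
      show ¬ ((63:Int) ≤ code) by omega,
      show code < (63:Int) by omega,
      show ¬ ((71:Int) ≤ code) by omega,
      show code < (71:Int) by omega,
      show ¬ ((80:Int) ≤ code) by omega,
      show code < (80:Int) by omega,
      show ¬ ((95:Int) ≤ code) by omega,
      show code < (95:Int) by omega]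
  by_cases h2 : code < (2:Int)
  · -- interval [1, 2)
    simp [wmo_code_py, wmo_code_py_alt, wmoScanA, wmoTableA, wmoThresholds, wmoValues,
      wmoBisectRight,
      show ((0:Int) ≤ code) by omega,
      show ¬ code < (0:Int) by omega,
      show ((1:Int) ≤ code) by omega,
      show ¬ code < (1:Int) by omega,
      show ¬ ((2:Int) ≤ code) by omega,
      show code < (2:Int) by omega,
      show ¬ ((3:Int) ≤ code) by omega,
      show code < (3:Int) by omega,
      show ¬ ((45:Int) ≤ code) by omega,
      show code < (45:Int) by omega,
      show ¬ ((48:Int) ≤ code) by omega,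
      show code < (48:Int) by omega,
      show ¬ ((51:Int) ≤ code) by omega,
      show code < (51:Int) by omega,
      show ¬ ((61:Int) ≤ code) by omega,
      show code < (61:Int) by omega,
      show ¬ ((63:Int) ≤ code) by omega,
      show code < (63:Int) by omega,
      show ¬ ((71:Int) ≤ code) by omega,
      show code < (71:Int) by omega,
      show ¬ ((80:Int) ≤ code) by omega,
      show code < (80:Int) by omega,
      show ¬ ((95:Int) ≤ code) by omega,
      show code < (95:Int) by omega]
  by_cases h3 : code < (3:Int)
  · -- interval [2, 3)
    simp [wmo_code_py, wmo_code_py_alt, wmoScanA, wmoTableA, wmoThresholds, wmoValues,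
      wmoBisectRight,
      show ((0:Int) ≤ code) by omega,
      show ¬ code < (0:Int) by omega,
      show ((1:Int) ≤ code) by omega,
      show ¬ code < (1:Int) by omega,
      show ((2:Int) ≤ code) by omega,
      show ¬ code < (2:Int) by omega,
      show ¬ ((3:Int) ≤ code) by omega,
      show code < (3:Int) by omega,
      show ¬ ((45:Int) ≤ code) by omega,
      show code < (45:Int) by omega,
      show ¬ ((48:Int) ≤ code) by omega,
      show code < (48:Int) by omega,
      show ¬ ((51:Int) ≤ code) by omega,
      show code < (51:Int) by omega,
      show ¬ ((61:Int) ≤ code) by omega,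
      show code < (61:Int) by omega,
      show ¬ ((63:Int) ≤ code) by omega,
      show code < (63:Int) by omega,
      show ¬ ((71:Int) ≤ code) by omega,
      show code < (71:Int) by omega,
      show ¬ ((80:Int) ≤ code) by omega,
      show code < (80:Int) by omega,
      show ¬ ((95:Int) ≤ code) by omega,
      show code < (95:Int) by omega]
  by_cases h4 : code < (45:Int)
  · -- interval [3, 45)
    simp [wmo_code_py, wmo_code_py_alt, wmoScanA, wmoTableA, wmoThresholds, wmoValues,
      wmoBisectRight,
      show ((0:Int) ≤ code) by omega,
      show ¬ code < (0:Int) by omega,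
      show ((1:Int) ≤ code) by omega,
      show ¬ code < (1:Int) by omega,
      show ((2:Int) ≤ code) by omega,
      show ¬ code < (2:Int) by omega,
      show ((3:Int) ≤ code) by omega,
      show ¬ code < (3:Int) by omega,
      show ¬ ((45:Int) ≤ code) by omega,
      show code < (45:Int) by omega,
      show ¬ ((48:Int) ≤ code) by omega,
      show code < (48:Int) by omega,
      show ¬ ((51:Int) ≤ code) by omega,
      show code < (51:Int) by omega,
      show ¬ ((61:Int) ≤ code) by omega,
      show code < (61:Int) by omega,
      show ¬ ((63:Int) ≤ code) by omega,
      show code < (63:Int) by omega,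
      show ¬ ((71:Int) ≤ code) by omega,
      show code < (71:Int) by omega,
      show ¬ ((80:Int) ≤ code) by omega,
      show code < (80:Int) by omega,
      show ¬ ((95:Int) ≤ code) by omega,
      show code < (95:Int) by omega]
  by_cases h5 : code < (48:Int)
  · -- interval [45, 48)
    simp [wmo_code_py, wmo_code_py_alt, wmoScanA, wmoTableA, wmoThresholds, wmoValues,
      wmoBisectRight,
      show ((0:Int) ≤ code) by omega,
      show ¬ code < (0:Int) by omega,
      show ((1:Int) ≤ code) by omega,
      show ¬ code < (1:Int) by omega,
      show ((2:Int) ≤ code) by omega,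
      show ¬ code < (2:Int) by omega,
      show ((3:Int) ≤ code) by omega,
      show ¬ code < (3:Int) by omega,
      show ((45:Int) ≤ code) by omega,
      show ¬ code < (45:Int) by omega,
      show ¬ ((48:Int) ≤ code) by omega,
      show code < (48:Int) by omega,
      show ¬ ((51:Int) ≤ code) by omega,
      show code < (51:Int) by omega,
      show ¬ ((61:Int) ≤ code) by omega,
      show code < (61:Int) by omega,
      show ¬ ((63:Int) ≤ code) by omega,
      show code < (63:Int) by omega,
      show ¬ ((71:Int) ≤ code) by omega,
      show code < (71:Int) by omega,
      show ¬ ((80:Int) ≤ code) by omega,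
      show code < (80:Int) by omega,
      show ¬ ((95:Int) ≤ code) by omega,
      show code < (95:Int) by omega]
  by_cases h6 : code < (51:Int)
  · -- interval [48, 51)
    simp [wmo_code_py, wmo_code_py_alt, wmoScanA, wmoTableA, wmoThresholds, wmoValues,
      wmoBisectRight,
      show ((0:Int) ≤ code) by omega,
      show ¬ code < (0:Int) by omega,
      show ((1:Int) ≤ code) by omega,
      show ¬ code < (1:Int) by omega,
      show ((2:Int) ≤ code) by omega,
      show ¬ code < (2:Int) by omega,
      show ((3:Int) ≤ code) by omega,
      show ¬ code < (3:Int) by omega,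
      show ((45:Int) ≤ code) by omega,
      show ¬ code < (45:Int) by omega,
      show ((48:Int) ≤ code) by omega,
      show ¬ code < (48:Int) by omega,
      show ¬ ((51:Int) ≤ code) by omega,
      show code < (51:Int) by omega,
      show ¬ ((61:Int) ≤ code) by omega,
      show code < (61:Int) by omega,
      show ¬ ((63:Int) ≤ code) by omega,
      show code < (63:Int) by omega,
      show ¬ ((71:Int) ≤ code) by omega,
      show code < (71:Int) by omega,
      show ¬ ((80:Int) ≤ code) by omega,
      show code < (80:Int) by omega,
      show ¬ ((95:Int) ≤ code) by omega,
      show code < (95:Int) by omega]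
  by_cases h7 : code < (61:Int)
  · -- interval [51, 61)
    simp [wmo_code_py, wmo_code_py_alt, wmoScanA, wmoTableA, wmoThresholds, wmoValues,
      wmoBisectRight,
      show ((0:Int) ≤ code) by omega,
      show ¬ code < (0:Int) by omega,
      show ((1:Int) ≤ code) by omega,
      show ¬ code < (1:Int) by omega,
      show ((2:Int) ≤ code) by omega,
      show ¬ code < (2:Int) by omega,
      show ((3:Int) ≤ code) by omega,
      show ¬ code < (3:Int) by omega,
      show ((45:Int) ≤ code) by omega,
      show ¬ code < (45:Int) by omega,
      show ((48:Int) ≤ code) by omega,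
      show ¬ code < (48:Int) by omega,
      show ((51:Int) ≤ code) by omega,
      show ¬ code < (51:Int) by omega,
      show ¬ ((61:Int) ≤ code) by omega,
      show code < (61:Int) by omega,
      show ¬ ((63:Int) ≤ code) by omega,
      show code < (63:Int) by omega,
      show ¬ ((71:Int) ≤ code) by omega,
      show code < (71:Int) by omega,
      show ¬ ((80:Int) ≤ code) by omega,
      show code < (80:Int) by omega,
      show ¬ ((95:Int) ≤ code) by omega,
      show code < (95:Int) by omega]
  by_cases h8 : code < (63:Int)
  · -- interval [61, 63)
    simp [wmo_code_py, wmo_code_py_alt, wmoScanA, wmoTableA, wmoThresholds, wmoValues,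
      wmoBisectRight,
      show ((0:Int) ≤ code) by omega,
      show ¬ code < (0:Int) by omega,
      show ((1:Int) ≤ code) by omega,
      show ¬ code < (1:Int) by omega,
      show ((2:Int) ≤ code) by omega,
      show ¬ code < (2:Int) by omega,
      show ((3:Int) ≤ code) by omega,
      show ¬ code < (3:Int) by omega,
      show ((45:Int) ≤ code) by omega,
      show ¬ code < (45:Int) by omega,
      show ((48:Int) ≤ code) by omega,
      show ¬ code < (48:Int) by omega,
      show ((51:Int) ≤ code) by omega,
      show ¬ code < (51:Int) by omega,
      show ((61:Int) ≤ code) by omega,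
      show ¬ code < (61:Int) by omega,
      show ¬ ((63:Int) ≤ code) by omega,
      show code < (63:Int) by omega,
      show ¬ ((71:Int) ≤ code) by omega,
      show code < (71:Int) by omega,
      show ¬ ((80:Int) ≤ code) by omega,
      show code < (80:Int) by omega,
      show ¬ ((95:Int) ≤ code) by omega,
      show code < (95:Int) by omega]
  by_cases h9 : code < (71:Int)
  · -- interval [63, 71)
    simp [wmo_code_py, wmo_code_py_alt, wmoScanA, wmoTableA, wmoThresholds, wmoValues,
      wmoBisectRight,
      show ((0:Int) ≤ code) by omega,
      show ¬ code < (0:Int) by omega,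
      show ((1:Int) ≤ code) by omega,
      show ¬ code < (1:Int) by omega,
      show ((2:Int) ≤ code) by omega,
      show ¬ code < (2:Int) by omega,
      show ((3:Int) ≤ code) by omega,
      show ¬ code < (3:Int) by omega,
      show ((45:Int) ≤ code) by omega,
      show ¬ code < (45:Int) by omega,
      show ((48:Int) ≤ code) by omega,
      show ¬ code < (48:Int) by omega,
      show ((51:Int) ≤ code) by omega,
      show ¬ code < (51:Int) by omega,
      show ((61:Int) ≤ code) by omega,
      show ¬ code < (61:Int) by omega,
      show ((63:Int) ≤ code) by omega,
      show ¬ code < (63:Int) by omega,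
      show ¬ ((71:Int) ≤ code) by omega,
      show code < (71:Int) by omega,
      show ¬ ((80:Int) ≤ code) by omega,
      show code < (80:Int) by omega,
      show ¬ ((95:Int) ≤ code) by omega,
      show code < (95:Int) by omega]
  by_cases h10 : code < (80:Int)
  · -- interval [71, 80)
    simp [wmo_code_py, wmo_code_py_alt, wmoScanA, wmoTableA, wmoThresholds, wmoValues,
      wmoBisectRight,
      show ((0:Int) ≤ code) by omega,
      show ¬ code < (0:Int) by omega,
      show ((1:Int) ≤ code) by omega,
      show ¬ code < (1:Int) by omega,
      show ((2:Int) ≤ code) by omega,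
      show ¬ code < (2:Int) by omega,
      show ((3:Int) ≤ code) by omega,
      show ¬ code < (3:Int) by omega,
      show ((45:Int) ≤ code) by omega,
      show ¬ code < (45:Int) by omega,
      show ((48:Int) ≤ code) by omega,
      show ¬ code < (48:Int) by omega,
      show ((51:Int) ≤ code) by omega,
      show ¬ code < (51:Int) by omega,
      show ((61:Int) ≤ code) by omega,
      show ¬ code < (61:Int) by omega,
      show ((63:Int) ≤ code) by omega,
      show ¬ code < (63:Int) by omega,
      show ((71:Int) ≤ code) by omega,
      show ¬ code < (71:Int) by omega,
      show ¬ ((80:Int) ≤ code) by omega,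
      show code < (80:Int) by omega,
      show ¬ ((95:Int) ≤ code) by omega,
      show code < (95:Int) by omega]
  by_cases h11 : code < (95:Int)
  · -- interval [80, 95)
    simp [wmo_code_py, wmo_code_py_alt, wmoScanA, wmoTableA, wmoThresholds, wmoValues,
      wmoBisectRight,
      show ((0:Int) ≤ code) by omega,
      show ¬ code < (0:Int) by omega,
      show ((1:Int) ≤ code) by omega,
      show ¬ code < (1:Int) by omega,
      show ((2:Int) ≤ code) by omega,
      show ¬ code < (2:Int) by omega,
      show ((3:Int) ≤ code) by omega,
      show ¬ code < (3:Int) by omega,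
      show ((45:Int) ≤ code) by omega,
      show ¬ code < (45:Int) by omega,
      show ((48:Int) ≤ code) by omega,
      show ¬ code < (48:Int) by omega,
      show ((51:Int) ≤ code) by omega,
      show ¬ code < (51:Int) by omega,
      show ((61:Int) ≤ code) by omega,
      show ¬ code < (61:Int) by omega,
      show ((63:Int) ≤ code) by omega,
      show ¬ code < (63:Int) by omega,
      show ((71:Int) ≤ code) by omega,
      show ¬ code < (71:Int) by omega,
      show ((80:Int) ≤ code) by omega,
      show ¬ code < (80:Int) by omega,
      show ¬ ((95:Int) ≤ code) by omega,
      show code < (95:Int) by omega]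
  -- interval [95, inf)
  simp [wmo_code_py, wmo_code_py_alt, wmoScanA, wmoTableA, wmoThresholds, wmoValues,
    wmoBisectRight,
    show ((0:Int) ≤ code) by omega,
    show ¬ code < (0:Int) by omega,
    show ((1:Int) ≤ code) by omega,
    show ¬ code < (1:Int) by omega,
    show ((2:Int) ≤ code) by omega,
    show ¬ code < (2:Int) by omega,
    show ((3:Int) ≤ code) by omega,
    show ¬ code < (3:Int) by omega,
    show ((45:Int) ≤ code) by omega,
    show ¬ code < (45:Int) by omega,
    show ((48:Int) ≤ code) by omega,
    show ¬ code < (48:Int) by omega,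
    show ((51:Int) ≤ code) by omega,
    show ¬ code < (51:Int) by omega,
    show ((61:Int) ≤ code) by omega,
    show ¬ code < (61:Int) by omega,
    show ((63:Int) ≤ code) by omega,
    show ¬ code < (63:Int) by omega,
    show ((71:Int) ≤ code) by omega,
    show ¬ code < (71:Int) by omega,
    show ((80:Int) ≤ code) by omega,
    show ¬ code < (80:Int) by omega,
    show ((95:Int) ≤ code) by omega,
    show ¬ code < (95:Int) by omega]
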